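-- pv_equiv track=rewrite | github.com/a676-code/prime-reversal-sequence | prime-reversal-sequence.py | generate_prime_reversal_sequence
-- ===== SOURCE A (Python) =====
-- def prime(n):
--     if n == 1:
--         return False
--
--     for i in range(2, n):
--         if n % i == 0:
--             return False
--     return True
--
-- def decimalToBinary(n):
--     digits = []
--     while n >= 1:
--         digits.append(n % 2)
--         if n % 2 == 1:
--             n = int((n - 1) / 2)
--         elif n % 2 == 0:
--             n = int(n / 2)
--     return digits
--
-- def binaryToDecimal(digits):
--     result = 0
--     digits.reverse()
--     for i, d in enumerate(digits):
--         result += d * (2 ** i)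
--     return result
--
-- def generate_prime_reversal_sequence(n):
--     sequence = []
--     i = 2
--     while len(sequence) < n:
--         if prime(i):
--             binary = decimalToBinary(i)
--             num = binaryToDecimal(binary)
--             sequence.append(i - num)
--         if i == 2:
--             i += 1
--         else:
--             i += 2
--     return sequence
-- ===== SOURCE B (Python) =====
-- def _is_prime(m):
--     if m < 2:
--         return False
--     d = 2
--     while d * d <= m:
--         if m % d == 0:
--             return False
--         d += 1
--     return True
--
--
-- def _bit_reverse(m):
--     rev = 0
--     while m >= 1:
--         rev = rev * 2 + m % 2
--         m //= 2
--     return rev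
--
--
-- def generate_prime_reversal_sequence(n):
--     sequence = []
--     i = 2
--     while len(sequence) < n:
--         if _is_prime(i):
--             sequence.append(i - _bit_reverse(i))
--         i = i + 1 if i == 2 else i + 2
--     return sequence
-- ===== Notes on version B (the rewrite author's own statement) =====
-- stated objective: faster
-- what changed: Primality is tested by trial division only up to sqrt(p) instead of scanning every number below p, and the bit reversal is computed by one arithmetic loop (rev = rev*2 + m%2) instead of building a binary-digit list, reversing it in place and re-summing powers of two.
import Mathlib
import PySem

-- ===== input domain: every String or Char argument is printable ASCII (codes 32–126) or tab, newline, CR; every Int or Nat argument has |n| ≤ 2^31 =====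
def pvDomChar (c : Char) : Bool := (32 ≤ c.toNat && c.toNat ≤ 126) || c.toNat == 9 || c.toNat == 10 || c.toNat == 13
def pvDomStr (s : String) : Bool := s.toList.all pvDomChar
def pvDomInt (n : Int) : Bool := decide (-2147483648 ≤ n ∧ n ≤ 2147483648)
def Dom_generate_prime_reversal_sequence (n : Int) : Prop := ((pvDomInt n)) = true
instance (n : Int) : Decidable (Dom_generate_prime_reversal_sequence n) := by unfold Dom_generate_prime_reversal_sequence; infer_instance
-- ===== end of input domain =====

-- B replaces A's O(p) trial division per candidate by trial division up to √p and the
-- two-list binary round-trip by a single arithmetic bit-reversal loop (objective: faster).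

-- ===== PORT A =====
-- prime(n): the early-return for-loop over range(2, n) is the conjunction `all` over that range.
-- All numbers reaching these helpers are nonnegative, so they are carried as Nat
-- (the Python values are the same nonnegative integers at every step).
def pvPrimeA (m : Nat) : Bool :=
  if m = 1 then false
  else (List.range' 2 (m - 2)).all (fun i => decide (¬ m % i = 0))

-- decimalToBinary's while loop; `int((n-1)/2)` / `int(n/2)` are exact integer halvings here.
def pvDecToBinAux (m : Nat) (digits : List Nat) : List Nat :=
  if 1 ≤ m then
    let digits' := digits ++ [m % 2]
    if m % 2 = 1 then pvDecToBinAux ((m - 1) / 2) digits'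
    else pvDecToBinAux (m / 2) digits'
  else digits
termination_by m
decreasing_by all_goals omega

-- binaryToDecimal: reverse in place, then the enumerate-for-loop as a fold.
-- enumerate is rendered with Nat indices (List.zipIdx): its indices are ≥ 0, so this is exact.
def pvBinToDec (digits : List Nat) : Nat :=
  (digits.reverse.zipIdx).foldl (fun result p => result + p.1 * 2 ^ p.2) 0

def pvLoopA (fuel : Nat) (i : Nat) (sequence : List Int) (n : Int) : List Int :=
  match fuel with
  | 0 => sequence
  | fuel + 1 =>
    if (sequence.length : Int) < n then
      let sequence' :=
        if pvPrimeA i then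
          sequence ++ [(i : Int) - (pvBinToDec (pvDecToBinAux i []) : Int)]
        else sequence
      pvLoopA fuel (if i = 2 then i + 1 else i + 2) sequence' n
    else sequence

-- fuel only makes the unbounded while loop total; it is never exhausted for any n in Dom
-- the loop actually finishes on (the loop stops as soon as the sequence has n entries).
def generate_prime_reversal_sequence (n : Int) : List Int :=
  pvLoopA 1099511627776 2 [] n

-- ===== PORT B =====
-- trial division only up to √m
def pvPrimeBAux (m d : Nat) : Bool :=
  if h : d * d ≤ m then
    if m % d = 0 then false else pvPrimeBAux m (d + 1)
  else true
termination_by m + 1 - d * d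
decreasing_by
  have h2 : (d + 1) * (d + 1) = d * d + 2 * d + 1 := by ring
  omega

def pvPrimeB (m : Nat) : Bool :=
  if m < 2 then false else pvPrimeBAux m 2

-- arithmetic bit reversal, no digit lists
def pvBitrevAux (m rev : Nat) : Nat :=
  if 1 ≤ m then pvBitrevAux (m / 2) (rev * 2 + m % 2) else rev
termination_by m
decreasing_by omega

def pvLoopB (fuel : Nat) (i : Nat) (sequence : List Int) (n : Int) : List Int :=
  match fuel with
  | 0 => sequence
  | fuel + 1 =>
    if (sequence.length : Int) < n then
      let sequence' :=
        if pvPrimeB i then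
          sequence ++ [(i : Int) - (pvBitrevAux i 0 : Int)]
        else sequence
      pvLoopB fuel (if i = 2 then i + 1 else i + 2) sequence' n
    else sequence

def generate_prime_reversal_sequence_alt (n : Int) : List Int :=
  pvLoopB 1099511627776 2 [] n

-- ===== PRECONDITION & SPEC =====
def Spec_generate_prime_reversal_sequence (n : Int) (out : List Int) : Prop := out = generate_prime_reversal_sequence_alt n
instance (n : Int) (out : List Int) : Decidable (Spec_generate_prime_reversal_sequence n out) := by unfold Spec_generate_prime_reversal_sequence; infer_instance

-- ===== CLAIM (what is proved, stated in full; the proofs are below) =====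
def Claim_equal_generate_prime_reversal_sequence : Prop := ∀ (n : Int), Dom_generate_prime_reversal_sequence n → Spec_generate_prime_reversal_sequence n (generate_prime_reversal_sequence n)

-- ===== LEMMAS AND PROOFS =====

-- the LSB-first bit list of m
def pvBits (m : Nat) : List Nat :=
  if 1 ≤ m then m % 2 :: pvBits (m / 2) else []
termination_by m
decreasing_by omega

-- the value of an LSB-first digit list
def pvVal : List Nat → Nat
  | [] => 0
  | b :: t => b + 2 * pvVal t

theorem pvDecToBinAux_eq (m : Nat) : ∀ digits, pvDecToBinAux m digits = digits ++ pvBits m := by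
  induction m using Nat.strong_induction_on with
  | _ m ih =>
    intro ds
    rw [pvDecToBinAux, pvBits]
    by_cases h : 1 ≤ m
    · simp only [if_pos h]
      by_cases h2 : m % 2 = 1
      · rw [if_pos h2]
        have he : (m - 1) / 2 = m / 2 := by omega
        rw [he, ih (m / 2) (by omega)]
        simp
      · rw [if_neg h2, ih (m / 2) (by omega)]
        simp
    · simp [h]

theorem pvVal_append_single (xs : List Nat) (b : Nat) :
    pvVal (xs ++ [b]) = pvVal xs + b * 2 ^ xs.length := by
  induction xs with
  | nil => simp [pvVal]
  | cons x t ih => simp [pvVal, ih, pow_succ]; ring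

theorem pvZipIdx_foldl (xs : List Nat) : ∀ (k a : Nat),
    (xs.zipIdx k).foldl (fun result p => result + p.1 * 2 ^ p.2) a = a + 2 ^ k * pvVal xs := by
  induction xs with
  | nil => intro k a; simp [pvVal]
  | cons b t ih =>
    intro k a
    simp only [List.zipIdx_cons, List.foldl_cons, ih (k + 1), pvVal, pow_succ]
    ring

theorem pvBinToDec_eq (l : List Nat) : pvBinToDec l = pvVal l.reverse := by
  unfold pvBinToDec
  rw [pvZipIdx_foldl]
  simp

theorem pvFoldl_horner (l : List Nat) : ∀ rev : Nat,
    l.foldl (fun r b => r * 2 + b) rev = rev * 2 ^ l.length + pvVal l.reverse := by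
  induction l with
  | nil => intro rev; simp [pvVal]
  | cons b t ih =>
    intro rev
    simp only [List.foldl_cons, ih, List.reverse_cons, pvVal_append_single,
      List.length_reverse, List.length_cons, pow_succ]
    ring

theorem pvBitrevAux_eq (m : Nat) : ∀ rev,
    pvBitrevAux m rev = (pvBits m).foldl (fun r b => r * 2 + b) rev := by
  induction m using Nat.strong_induction_on with
  | _ m ih =>
    intro rev
    rw [pvBitrevAux, pvBits]
    by_cases h : 1 ≤ m
    · simp only [if_pos h, List.foldl_cons]
      exact ih (m / 2) (by omega) _
    · simp [h]

theorem pvRev_eq (m : Nat) : pvBinToDec (pvDecToBinAux m []) = pvBitrevAux m 0 := by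
  rw [pvDecToBinAux_eq, pvBitrevAux_eq, pvFoldl_horner, pvBinToDec_eq]
  simp

theorem pvPrimeBAux_iff (m d : Nat) :
    pvPrimeBAux m d = true ↔ ∀ k, d ≤ k → k * k ≤ m → ¬ m % k = 0 := by
  fun_induction pvPrimeBAux m d with
  | case1 d hle hmod =>
    simp only [Bool.false_eq_true, false_iff]
    intro H
    exact H d le_rfl hle hmod
  | case2 d hle hmod ih =>
    rw [ih]
    constructor
    · intro H k hk hkk
      rcases Nat.eq_or_lt_of_le hk with rfl | hlt
      · exact hmod
      · exact H k hlt hkk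
    · intro H k hk hkk
      exact H k (by omega) hkk
  | case3 d hle =>
    simp only [true_iff]
    intro k hk hkk
    have : d * d ≤ k * k := Nat.mul_le_mul hk hk
    omega

theorem pvPrime_eq (m : Nat) (hm : 2 ≤ m) : pvPrimeA m = pvPrimeB m := by
  unfold pvPrimeA pvPrimeB
  rw [if_neg (by omega : ¬ m = 1), if_neg (by omega : ¬ m < 2)]
  rw [Bool.eq_iff_iff, List.all_eq_true, pvPrimeBAux_iff]
  constructor
  · intro H k h2 hkk
    have h2k : 2 * k ≤ k * k := Nat.mul_le_mul_right k h2
    have hmem : k ∈ List.range' 2 (m - 2) := by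
      rw [List.mem_range'_1]
      exact ⟨by omega, by omega⟩
    simpa using H k hmem
  · intro H i hi
    rw [List.mem_range'_1] at hi
    simp only [decide_eq_true_eq]
    intro hmod0
    have h2 : 2 ≤ i := hi.1
    have him : i < m := by omega
    obtain ⟨j, hj⟩ := Nat.dvd_of_mod_eq_zero hmod0
    have hj2 : 2 ≤ j := by
      rcases Nat.lt_or_ge j 2 with hlt | hge
      · interval_cases j <;> omega
      · exact hge
    by_cases hii : i * i ≤ m
    · exact H i h2 hii hmod0
    · have hji : j < i := by
        have : i * j < i * i := by omega
        exact Nat.lt_of_mul_lt_mul_left this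
      have hjj : j * j ≤ m := by
        calc j * j ≤ i * j := Nat.mul_le_mul_right j (le_of_lt hji)
        _ = m := hj.symm
      have hmodj : m % j = 0 := by
        rw [hj]
        simp [Nat.mul_mod_left]
      exact H j hj2 hjj hmodj

theorem pvLoop_eq (fuel : Nat) : ∀ (i : Nat) (sequence : List Int) (n : Int), 2 ≤ i →
    pvLoopA fuel i sequence n = pvLoopB fuel i sequence n := by
  induction fuel with
  | zero => intro i s n _; rfl
  | succ fuel ih =>
    intro i s n hi
    simp only [pvLoopA, pvLoopB, pvPrime_eq i hi, pvRev_eq i]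
    split
    · exact ih _ _ _ (by split <;> omega)
    · rfl

-- ===== VERDICT (by name: the statement is the Claim_ definition above) =====
theorem generate_prime_reversal_sequence_spec : Claim_equal_generate_prime_reversal_sequence := by
  intro n _
  unfold Spec_generate_prime_reversal_sequence generate_prime_reversal_sequence
    generate_prime_reversal_sequence_alt
  exact pvLoop_eq _ _ _ _ (by norm_num)
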